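-- pv_equiv track=rewrite | github.com/aggressiveidea/primality_test | main.py | _lucas_sequence_mod
-- ===== SOURCE A (Python) =====
-- def _lucas_sequence_mod(n: int, D: int) -> bool:
--     """
--     Compute Lucas sequence U_{n+1} mod n.
--     Returns True if U_{n+1} ≡ 0 mod n (Lucas probable prime).
--     """
--     P = 1
--     Q = (1 - D) // 4
--
--     # Helper for division by 2 modulo odd n
--     def div2_mod(x: int, mod: int) -> int:
--         return (x // 2) if x % 2 == 0 else ((x + mod) // 2) % mod
--
--     # Fast doubling algorithm for Lucas sequences
--     k = n + 1
--     U, V = 1, P % n  # U1, V1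
--     Qk = Q % n
--
--     # Process bits of k (skipping the first '1')
--     bits = bin(k)[3:]
--
--     for bit in bits:
--         # Double step
--         U = (U * V) % n
--         V = (V * V - 2 * Qk) % n
--         Qk = (Qk * Qk) % n
--
--         if bit == '1':
--             # Add step
--             U, V = div2_mod(P * U + V, n), div2_mod(D * U + P * V, n)
--             Qk = (Qk * Q) % n
--
--     return U == 0
-- ===== SOURCE B (Python) =====
-- def _lucas_sequence_mod(n: int, D: int) -> bool:
--     P = 1
--     Q = (1 - D) // 4
--
--     def div2_mod(x: int, mod: int) -> int:
--         return (x // 2) if x % 2 == 0 else ((x + mod) // 2) % mod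
--
--     # Recursive divide-and-conquer fast doubling: rec(k) = (U_k, V_k, Q^k) mod n.
--     def rec(k):
--         if k == 1:
--             return 1, P % n, Q % n
--         U, V, Qk = rec(k // 2)
--         U = (U * V) % n
--         V = (V * V - 2 * Qk) % n
--         Qk = (Qk * Qk) % n
--         if k % 2 == 1:
--             U, V = div2_mod(P * U + V, n), div2_mod(D * U + P * V, n)
--             Qk = (Qk * Q) % n
--         return U, V, Qk
--
--     U, _, _ = rec(n + 1)
--     return U == 0
-- ===== Notes on version B (the rewrite author's own statement) =====
-- stated objective: alternative
-- what changed: Replaces the bin()-string bit loop with recursive divide-and-conquer fast doubling on k itself: rec(k) returns (U_k, V_k, Q^k mod n) built from rec(k//2), so the binary-string construction disappears; same identities and div2_mod.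
-- outside the precondition, e.g. on _lucas_sequence_mod(-3, 5): A returns False, B raises RecursionError; on _lucas_sequence_mod(0, 5): A raises ZeroDivisionError, B raises ZeroDivisionError
import Mathlib
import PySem

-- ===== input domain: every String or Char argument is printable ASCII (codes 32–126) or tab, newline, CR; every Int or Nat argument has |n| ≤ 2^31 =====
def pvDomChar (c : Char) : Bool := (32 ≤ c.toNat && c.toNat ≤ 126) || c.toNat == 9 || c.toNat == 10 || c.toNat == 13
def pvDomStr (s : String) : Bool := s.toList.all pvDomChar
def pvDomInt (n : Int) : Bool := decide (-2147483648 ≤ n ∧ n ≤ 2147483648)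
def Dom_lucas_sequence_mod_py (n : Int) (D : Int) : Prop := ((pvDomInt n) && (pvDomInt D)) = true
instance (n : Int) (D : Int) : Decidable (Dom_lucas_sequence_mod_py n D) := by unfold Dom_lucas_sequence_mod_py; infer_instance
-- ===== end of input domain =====

-- B replaces A's bin()-string bit loop with recursive divide-and-conquer fast doubling on k
-- itself (alternative decomposition, same identities and div2_mod); equivalence on n ≥ 1.

-- ===== PORT A =====
def pvDiv2ModA (x md : Int) : Int :=
  if PySem.Int.mod x 2 == 0 then PySem.Int.floordiv x 2
  else PySem.Int.mod (PySem.Int.floordiv (x + md) 2) md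

-- msb-first binary digits of a natural number (bin(k) without the "0b" prefix)
def pvBinDigits : Nat → List Bool
  | 0 => []
  | (k+1) => pvBinDigits ((k+1) / 2) ++ [(k+1) % 2 == 1]
decreasing_by exact Nat.div_lt_self (Nat.succ_pos k) (by norm_num)

def pvStepA (n D P Q : Int) (s : Int × Int × Int) (bit : Bool) : Int × Int × Int :=
  let U := PySem.Int.mod (s.1 * s.2.1) n
  let V := PySem.Int.mod (s.2.1 * s.2.1 - 2 * s.2.2) n
  let Qk := PySem.Int.mod (s.2.2 * s.2.2) n
  if bit then
    (pvDiv2ModA (P * U + V) n, pvDiv2ModA (D * U + P * V) n, PySem.Int.mod (Qk * Q) n)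
  else (U, V, Qk)

def lucas_sequence_mod_py (n : Int) (D : Int) : Bool :=
  let P : Int := 1
  let Q : Int := PySem.Int.floordiv (1 - D) 4
  let k : Int := n + 1
  let U : Int := 1
  let V : Int := PySem.Int.mod P n
  let Qk : Int := PySem.Int.mod Q n
  let bits : List Bool := (pvBinDigits k.toNat).drop 1
  let r := bits.foldl (pvStepA n D P Q) (U, V, Qk)
  r.1 == 0

-- ===== PORT B =====
def pvDiv2ModB (x md : Int) : Int :=
  if PySem.Int.mod x 2 == 0 then PySem.Int.floordiv x 2
  else PySem.Int.mod (PySem.Int.floordiv (x + md) 2) md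

-- rec(k) = (U_k, V_k, Q^k) mod n, by recursion on k // 2 (Python's `if k == 1` base;
-- `k ≤ 1` here only to make the Lean recursion total — k = 0 is never reached from Pre_)
def pvRecB (n D P Q : Int) : Nat → Int × Int × Int
  | k =>
    if k ≤ 1 then (1, PySem.Int.mod P n, PySem.Int.mod Q n)
    else
      let s := pvRecB n D P Q (k / 2)
      let U := PySem.Int.mod (s.1 * s.2.1) n
      let V := PySem.Int.mod (s.2.1 * s.2.1 - 2 * s.2.2) n
      let Qk := PySem.Int.mod (s.2.2 * s.2.2) n
      if k % 2 == 1 then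
        (pvDiv2ModB (P * U + V) n, pvDiv2ModB (D * U + P * V) n, PySem.Int.mod (Qk * Q) n)
      else (U, V, Qk)
decreasing_by exact Nat.div_lt_self (by omega) (by norm_num)

def lucas_sequence_mod_py_alt (n : Int) (D : Int) : Bool :=
  let P : Int := 1
  let Q : Int := PySem.Int.floordiv (1 - D) 4
  let r := pvRecB n D P Q (n + 1).toNat
  r.1 == 0

-- ===== PRECONDITION & SPEC =====
-- Pre_ excludes n ≤ 0: A raises ZeroDivisionError at n = 0, and for negative n its
-- bin(k)[3:] slicing of the sign-prefixed '-0b…' string of a negative k yields an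
-- accidental bit string over a negative modulus, on which B's recursion does not
-- terminate (RecursionError).
def Pre_lucas_sequence_mod_py (n : Int) (D : Int) : Prop := 1 ≤ n
instance (n : Int) (D : Int) : Decidable (Pre_lucas_sequence_mod_py n D) := by unfold Pre_lucas_sequence_mod_py; infer_instance

def pvWitness_lucas_sequence_mod_py : Int × Int := (11, 5)

def Spec_lucas_sequence_mod_py (n : Int) (D : Int) (out : Bool) : Prop := out = lucas_sequence_mod_py_alt n D
instance (n : Int) (D : Int) (out : Bool) : Decidable (Spec_lucas_sequence_mod_py n D out) := by unfold Spec_lucas_sequence_mod_py; infer_instance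

-- ===== CLAIM (what is proved, stated in full; the proofs are below) =====
def Claim_equal_lucas_sequence_mod_py : Prop := ∀ (n : Int) (D : Int), Dom_lucas_sequence_mod_py n D → Pre_lucas_sequence_mod_py n D → Spec_lucas_sequence_mod_py n D (lucas_sequence_mod_py n D)

-- ===== LEMMAS AND PROOFS =====

theorem pvBinDigits_ne_nil {k : Nat} (hk : 1 ≤ k) : pvBinDigits k ≠ [] := by
  cases k with
  | zero => omega
  | succ m => rw [pvBinDigits]; simp

theorem pvStepA_eq_body (n D P Q : Int) (s : Int × Int × Int) (bit : Bool) :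
    pvStepA n D P Q s bit =
      (let U := PySem.Int.mod (s.1 * s.2.1) n
       let V := PySem.Int.mod (s.2.1 * s.2.1 - 2 * s.2.2) n
       let Qk := PySem.Int.mod (s.2.2 * s.2.2) n
       if bit then
         (pvDiv2ModB (P * U + V) n, pvDiv2ModB (D * U + P * V) n, PySem.Int.mod (Qk * Q) n)
       else (U, V, Qk)) := by
  simp [pvStepA, pvDiv2ModA, pvDiv2ModB]

-- the key bridge: folding A's step over the dropped-msb bit list of k equals B's rec(k)
theorem pv_fold_eq_rec (n D P Q : Int) :
    ∀ k : Nat, 1 ≤ k →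
      List.foldl (pvStepA n D P Q)
        (1, PySem.Int.mod P n, PySem.Int.mod Q n) ((pvBinDigits k).drop 1)
      = pvRecB n D P Q k := by
  intro k
  induction k using Nat.strong_induction_on with
  | _ k ih =>
    intro hk
    by_cases h1 : k ≤ 1
    · have : k = 1 := by omega
      subst this
      simp [pvBinDigits, pvRecB]
    · -- k ≥ 2
      have hk2 : 2 ≤ k := by omega
      have hhalf : 1 ≤ k / 2 := Nat.one_le_div_iff (by norm_num) |>.mpr hk2
      cases k with
      | zero => omega
      | succ m =>
        rw [pvBinDigits]
        have hne : pvBinDigits ((m+1) / 2) ≠ [] := pvBinDigits_ne_nil hhalf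
        obtain ⟨a, t, ht⟩ : ∃ a t, pvBinDigits ((m+1) / 2) = a :: t := by
          cases hx : pvBinDigits ((m+1) / 2) with
          | nil => exact absurd hx hne
          | cons a t => exact ⟨a, t, rfl⟩
        rw [ht]
        have ihh := ih ((m+1) / 2) (Nat.div_lt_self (by omega) (by norm_num)) hhalf
        rw [ht] at ihh
        simp only [List.cons_append, List.drop_succ_cons, List.drop_zero] at ihh ⊢
        rw [List.foldl_append, ihh]
        conv_rhs => rw [pvRecB]
        rw [if_neg h1]
        simp only [List.foldl_cons, List.foldl_nil]
        rw [pvStepA_eq_body]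

-- ===== VERDICT (by name: the statement is the Claim_ definition above) =====
theorem lucas_sequence_mod_py_spec : Claim_equal_lucas_sequence_mod_py := by
  unfold Claim_equal_lucas_sequence_mod_py
  intro n D _ hpre
  have hn : 1 ≤ n := hpre
  unfold Spec_lucas_sequence_mod_py lucas_sequence_mod_py lucas_sequence_mod_py_alt
  have hk : 1 ≤ (n + 1).toNat := by omega
  simp only []
  rw [pv_fold_eq_rec n D 1 (PySem.Int.floordiv (1 - D) 4) (n + 1).toNat hk]
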